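-- pv_equiv track=rewrite | github.com/ashfaqsyedn/Daily-Code | 285.py | sunset_views
-- ===== SOURCE A (Python) =====
-- def sunset_views(buildings):
--     views = []
--     highest = 0
--
--     for building in buildings:
--         while views and views[-1] <= building:
--             views.pop()
--         views.append(building)
--
--     return len(views)
-- ===== SOURCE B (Python) =====
-- def sunset_views(buildings):
--     count = 0
--     mx = None
--     for b in reversed(buildings):
--         if mx is None or b > mx:
--             count += 1
--             mx = b
--     return count
-- ===== Notes on version B (the rewrite author's own statement) =====
-- stated objective: faster
-- what changed: Replaces the stack with pop-while loop by a single reverse pass that keeps a running maximum of the buildings already seen to the right and counts those strictly greater than it.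
import Mathlib
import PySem

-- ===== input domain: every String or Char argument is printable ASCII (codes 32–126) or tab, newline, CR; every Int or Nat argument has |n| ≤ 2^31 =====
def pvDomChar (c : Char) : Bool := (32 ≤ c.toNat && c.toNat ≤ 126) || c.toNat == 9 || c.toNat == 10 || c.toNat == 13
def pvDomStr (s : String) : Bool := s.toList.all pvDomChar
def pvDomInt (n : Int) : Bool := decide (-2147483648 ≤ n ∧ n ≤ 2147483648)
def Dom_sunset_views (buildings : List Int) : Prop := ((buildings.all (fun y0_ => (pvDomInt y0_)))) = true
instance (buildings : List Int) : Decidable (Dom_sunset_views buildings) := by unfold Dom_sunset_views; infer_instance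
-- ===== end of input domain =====

-- B replaces A's stack (pop-while, then count survivors) by one reverse pass with a
-- running maximum, counting buildings strictly greater than it (same value, O(1) space).

-- ===== PORT A =====
-- the 'while views and views[-1] <= building: views.pop()' loop
def popLoop (b : Int) (views : List Int) : List Int :=
  match h : views.getLast? with
  | none => views
  | some v =>
      if v ≤ b then popLoop b views.dropLast else views
termination_by views.length
decreasing_by
  have hne : views ≠ [] := by intro hn; simp [hn] at h
  have hlen : 0 < views.length := List.length_pos_iff.mpr hne
  simp only [List.length_dropLast]
  omega

def sunset_views (buildings : List Int) : Int :=
  -- views = []; highest = 0 (unused in the Python); for building in buildings: …; return len(views)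
  ((buildings.foldl (fun views building => popLoop building views ++ [building]) []).length : Int)

-- ===== PORT B =====
def sunset_views_alt (buildings : List Int) : Int :=
  (buildings.reverse.foldl
    (fun acc b =>
      match acc.2 with
      | none => (acc.1 + 1, some b)
      | some mx => if b > mx then (acc.1 + 1, some b) else acc)
    ((0 : Int), (none : Option Int))).1

-- ===== PRECONDITION & SPEC =====
def Spec_sunset_views (buildings : List Int) (out : Int) : Prop := out = sunset_views_alt buildings
instance (buildings : List Int) (out : Int) : Decidable (Spec_sunset_views buildings out) := by unfold Spec_sunset_views; infer_instance

-- ===== CLAIM (what is proved, stated in full; the proofs are below) =====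
def Claim_equal_sunset_views : Prop := ∀ (buildings : List Int), Dom_sunset_views buildings → Spec_sunset_views buildings (sunset_views buildings)

-- ===== LEMMAS AND PROOFS =====

-- the final stack, characterised by recursion on the right: x survives iff it exceeds the max of its suffix
def gStack : List Int → List Int
  | [] => []
  | x :: xs =>
      match gStack xs with
      | [] => [x]
      | m :: t => if m < x then x :: m :: t else m :: t

lemma dropWhile_le_le {x m : Int} (hxm : x ≤ m) (l : List Int) :
    (l.dropWhile (fun a => a ≤ x)).dropWhile (fun a => a ≤ m)
      = l.dropWhile (fun a => a ≤ m) := by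
  induction l with
  | nil => simp
  | cons a t ih =>
    by_cases h : a ≤ x
    · have : a ≤ m := le_trans h hxm
      simp [h, this, ih]
    · simp [List.dropWhile_cons, h]

lemma popLoop_reverse (b : Int) (l : List Int) :
    popLoop b l.reverse = (l.dropWhile (fun a => a ≤ b)).reverse := by
  induction l with
  | nil => rw [popLoop.eq_def]; simp
  | cons a t ih =>
    rw [popLoop.eq_def]
    have hl : (a :: t).reverse.getLast? = some a := by simp
    split
    · next heq => rw [hl] at heq; cases heq
    · next v heq =>
      rw [hl] at heq; injection heq with hv; subst hv
      have hd : (a :: t).reverse.dropLast = t.reverse := by simp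
      by_cases h : a ≤ b
      · simp [h, ih]
      · simp [h]

lemma popLoop_eq (b : Int) (l : List Int) :
    popLoop b l = (l.reverse.dropWhile (fun a => a ≤ b)).reverse := by
  have := popLoop_reverse b l.reverse
  simpa using this

lemma foldA (xs : List Int) : ∀ (s : List Int),
    List.foldl (fun views building => popLoop building views ++ [building]) s xs
      = (match gStack xs with
         | [] => s
         | m :: _ => (s.reverse.dropWhile (fun a => a ≤ m)).reverse) ++ gStack xs := by
  induction xs with
  | nil => intro s; simp [gStack]
  | cons x xs ih =>
    intro s
    simp only [List.foldl_cons]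
    rw [ih]
    cases hx : gStack xs with
    | nil =>
      simp [gStack, hx, popLoop_eq]
    | cons m t =>
      by_cases hmx : m < x
      · have hxm : ¬ x ≤ m := not_le.mpr hmx
        simp [gStack, hx, hmx, popLoop_eq, hxm]
      · have hxm : x ≤ m := not_lt.mp hmx
        simp [gStack, hx, hmx, popLoop_eq, hxm, dropWhile_le_le hxm]

lemma foldB (xs : List Int) :
    List.foldr
      (fun b acc =>
        match acc.2 with
        | none => (acc.1 + 1, some b)
        | some mx => if b > mx then (acc.1 + 1, some b) else acc)
      ((0 : Int), (none : Option Int)) xs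
      = (((gStack xs).length : Int), (gStack xs).head?) := by
  induction xs with
  | nil => simp [gStack]
  | cons x xs ih =>
    simp only [List.foldr_cons, ih]
    cases hx : gStack xs with
    | nil => simp [gStack, hx]
    | cons m t =>
      by_cases hmx : m < x
      · simp [gStack, hx, hmx]
      · simp [gStack, hx, hmx]

lemma sunset_views_eq (xs : List Int) :
    sunset_views xs = ((gStack xs).length : Int) := by
  unfold sunset_views
  rw [foldA xs []]
  cases gStack xs <;> simp

lemma sunset_views_alt_eq (xs : List Int) :
    sunset_views_alt xs = ((gStack xs).length : Int) := by
  unfold sunset_views_alt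
  rw [List.foldl_reverse]
  rw [foldB xs]

-- ===== VERDICT (by name: the statement is the Claim_ definition above) =====
theorem sunset_views_spec : Claim_equal_sunset_views := by
  intro buildings _
  unfold Spec_sunset_views
  rw [sunset_views_eq, sunset_views_alt_eq]
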